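-- pv_equiv track=rewrite | github.com/eliottcassidy2000/math | 04-computation/q_polynomial_structure.py | build_cg
-- ===== SOURCE A (Python) =====
-- def build_cg(cycles):
--     nc = len(cycles)
--     adj = [[False]*nc for _ in range(nc)]
--     for i in range(nc):
--         for j in range(i+1, nc):
--             if set(cycles[i]) & set(cycles[j]):
--                 adj[i][j] = adj[j][i] = True
--     return adj
-- ===== SOURCE B (Python) =====
-- def build_cg(cycles):
--     nc = len(cycles)
--     index = {}
--     for i, c in enumerate(cycles):
--         for e in set(c):
--             index.setdefault(e, []).append(i)
--     adj = [[False] * nc for _ in range(nc)]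
--     for group in index.values():
--         for x in range(len(group)):
--             for y in range(x + 1, len(group)):
--                 a, b = group[x], group[y]
--                 adj[a][b] = adj[b][a] = True
--     return adj
-- ===== Notes on version B (the rewrite author's own statement) =====
-- stated objective: faster
-- what changed: Instead of testing every pair of cycles with a fresh set intersection, B builds an inverted index element->list of cycle indices in one pass and marks the pair (a,b) for every two indices sharing an element, so no per-pair set construction or intersection remains.
import Mathlib
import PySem

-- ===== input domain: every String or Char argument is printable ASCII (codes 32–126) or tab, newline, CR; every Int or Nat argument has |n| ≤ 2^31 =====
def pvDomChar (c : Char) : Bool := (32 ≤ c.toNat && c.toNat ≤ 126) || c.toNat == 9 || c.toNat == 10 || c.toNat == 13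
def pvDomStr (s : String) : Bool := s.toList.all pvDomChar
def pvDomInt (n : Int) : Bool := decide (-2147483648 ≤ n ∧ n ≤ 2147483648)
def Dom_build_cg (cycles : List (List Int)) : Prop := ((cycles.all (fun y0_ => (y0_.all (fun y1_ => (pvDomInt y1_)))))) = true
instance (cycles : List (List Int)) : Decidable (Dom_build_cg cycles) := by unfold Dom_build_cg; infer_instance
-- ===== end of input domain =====

-- B replaces the per-pair set intersection of A with an inverted index element -> cycle indices,
-- marking every pair of cycles that share an element; measurably faster (return-value equivalence).

-- ===== PORT A =====
-- shared helper: the Python double assignment 'adj[a][b] = adj[b][a] = True' (both Pythons contain this line)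
def pvMark (adj : List (List Bool)) (a b : Int) : List (List Bool) :=
  let adj1 := PySem.List.pySetD adj a (PySem.List.pySetD (PySem.List.pyGetD adj a []) b true)
  PySem.List.pySetD adj1 b (PySem.List.pySetD (PySem.List.pyGetD adj1 b []) a true)

def build_cg (cycles : List (List Int)) : List (List Bool) :=
  let nc : Int := cycles.length
  let adj : List (List Bool) := (PySem.List.pyRange 0 nc 1).map (fun _ => PySem.List.pyRepeat [false] nc)
  (PySem.List.pyRange 0 nc 1).foldl (fun adj i =>
    (PySem.List.pyRange (i+1) nc 1).foldl (fun adj j =>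
      if PySem.Set.inter (PySem.Set.ofList (PySem.List.pyGetD cycles i []))
           (PySem.Set.ofList (PySem.List.pyGetD cycles j [])) ≠ [] then
        pvMark adj i j
      else adj) adj) adj

-- ===== PORT B =====
def build_cg_alt (cycles : List (List Int)) : List (List Bool) :=
  let nc : Int := cycles.length
  let index : PySem.Dict Int (List Int) :=
    (PySem.List.enumerate cycles 0).foldl (fun d ic =>
      (PySem.Set.ofList ic.2).foldl (fun d e => d.modify e [] (fun g => g ++ [ic.1])) d)
      PySem.Dict.empty
  let adj : List (List Bool) := (PySem.List.pyRange 0 nc 1).map (fun _ => PySem.List.pyRepeat [false] nc)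
  index.values.foldl (fun adj group =>
    (PySem.List.pyRange 0 (group.length : Int) 1).foldl (fun adj x =>
      (PySem.List.pyRange (x+1) (group.length : Int) 1).foldl (fun adj y =>
        pvMark adj (PySem.List.pyGetD group x 0) (PySem.List.pyGetD group y 0)) adj) adj) adj

-- ===== PRECONDITION & SPEC =====
def Spec_build_cg (cycles : List (List Int)) (out : List (List Bool)) : Prop := out = build_cg_alt cycles
instance (cycles : List (List Int)) (out : List (List Bool)) : Decidable (Spec_build_cg cycles out) := by unfold Spec_build_cg; infer_instance

-- ===== CLAIM (what is proved, stated in full; the proofs are below) =====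
def Claim_equal_build_cg : Prop := ∀ (cycles : List (List Int)), Dom_build_cg cycles → Spec_build_cg cycles (build_cg cycles)

-- ===== LEMMAS AND PROOFS =====

-- fold a list of (row, col) pairs through pvMark
def pvFoldMark (m : List (List Bool)) (P : List (Int × Int)) : List (List Bool) :=
  P.foldl (fun m p => pvMark m p.1 p.2) m

-- an n × n matrix
def pvShape (m : List (List Bool)) (n : Nat) : Prop := m.length = n ∧ ∀ r ∈ m, r.length = n

def pvGetE (m : List (List Bool)) (i j : Nat) : Bool := (m.getD i []).getD j false

-- a nested fold is a fold over the flattened list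
theorem pv_foldl_flatMap {α β σ : Type} (l : List α) (g : α → List β) (f : σ → β → σ) (s : σ) :
    (l.flatMap g).foldl f s = l.foldl (fun s x => (g x).foldl f s) s := by
  induction l generalizing s with
  | nil => rfl
  | cons a t ih => simp [List.flatMap_cons, List.foldl_append, ih]

theorem pv_getD_set {α : Type} (r : List α) (v d : α) (k j : Nat) :
    (r.set k v).getD j d = if k = j ∧ j < r.length then v else r.getD j d := by
  simp only [List.getD_eq_getElem?_getD, List.getElem?_set]
  split_ifs with h1 h2 h3 <;> simp_all

theorem pvMark_natCast (m : List (List Bool)) (aN bN : Nat) :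
    pvMark m (aN : Int) (bN : Int) =
      (m.set aN ((m.getD aN []).set bN true)).set bN
        (((m.set aN ((m.getD aN []).set bN true)).getD bN []).set aN true) := by
  simp [pvMark]

theorem pvShape_mark {m : List (List Bool)} {n : Nat} (hm : pvShape m n)
    {a b : Int} (ha : 0 ≤ a ∧ a < n) (hb : 0 ≤ b ∧ b < n) :
    pvShape (pvMark m a b) n := by
  obtain ⟨hl, hr⟩ := hm
  obtain ⟨aN, rfl⟩ := Int.eq_ofNat_of_zero_le ha.1
  obtain ⟨bN, rfl⟩ := Int.eq_ofNat_of_zero_le hb.1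
  have haN : aN < n := by exact_mod_cast ha.2
  have hbN : bN < n := by exact_mod_cast hb.2
  have hrow : ∀ k : Nat, k < n → (m.getD k []).length = n := by
    intro k hk
    have hkm : k < m.length := by omega
    rw [List.getD_eq_getElem _ _ hkm]
    exact hr _ (List.getElem_mem hkm)
  rw [pvMark_natCast]
  refine ⟨by simp [hl], ?_⟩
  intro r hrr
  rcases List.mem_or_eq_of_mem_set hrr with h1 | h1
  · rcases List.mem_or_eq_of_mem_set h1 with h2 | h2
    · exact hr r h2
    · subst h2; rw [List.length_set]; exact hrow aN haN
  · subst h1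
    simp only [pv_getD_set, List.length_set]
    split_ifs with h2
    · rw [List.length_set]; exact hrow aN haN
    · exact hrow bN hbN

theorem pvGetE_mark {m : List (List Bool)} {n : Nat} (hm : pvShape m n)
    {a b : Int} (ha : 0 ≤ a ∧ a < n) (hb : 0 ≤ b ∧ b < n) (i j : Nat) :
    pvGetE (pvMark m a b) i j =
      if (a = (i : Int) ∧ b = (j : Int)) ∨ (a = (j : Int) ∧ b = (i : Int)) then true
      else pvGetE m i j := by
  obtain ⟨hl, hr⟩ := hm
  obtain ⟨aN, rfl⟩ := Int.eq_ofNat_of_zero_le ha.1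
  obtain ⟨bN, rfl⟩ := Int.eq_ofNat_of_zero_le hb.1
  have haN : aN < n := by exact_mod_cast ha.2
  have hbN : bN < n := by exact_mod_cast hb.2
  have hrow : ∀ k : Nat, k < n → (m.getD k []).length = n := by
    intro k hk
    have hkm : k < m.length := by omega
    rw [List.getD_eq_getElem _ _ hkm]
    exact hr _ (List.getElem_mem hkm)
  have hra := hrow aN haN
  have hrb := hrow bN hbN
  rw [pvMark_natCast]
  simp only [pvGetE, Nat.cast_inj, pv_getD_set, List.length_set, hl]
  split_ifs <;> simp_all <;> omega

def pvInRange (n : Nat) (P : List (Int × Int)) : Prop :=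
  ∀ p ∈ P, (0 ≤ p.1 ∧ p.1 < n) ∧ (0 ≤ p.2 ∧ p.2 < n)

theorem pvShape_foldMark {m : List (List Bool)} {n : Nat} (hm : pvShape m n)
    {P : List (Int × Int)} (hP : pvInRange n P) : pvShape (pvFoldMark m P) n := by
  induction P generalizing m with
  | nil => exact hm
  | cons p t ih =>
      exact ih (pvShape_mark hm (hP p (List.mem_cons_self ..)).1 (hP p (List.mem_cons_self ..)).2) (fun q hq => hP q (List.mem_cons_of_mem _ hq))

theorem pvGetE_foldMark {m : List (List Bool)} {n : Nat} (hm : pvShape m n)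
    {P : List (Int × Int)} (hP : pvInRange n P) (i j : Nat) :
    pvGetE (pvFoldMark m P) i j =
      (pvGetE m i j ||
        P.any (fun p => decide ((p.1 = (i : Int) ∧ p.2 = (j : Int)) ∨ (p.1 = (j : Int) ∧ p.2 = (i : Int))))) := by
  induction P generalizing m with
  | nil => simp [pvFoldMark]
  | cons p t ih =>
      have hp := hP p (List.mem_cons_self ..)
      rw [pvFoldMark, List.foldl_cons, ← pvFoldMark,
        ih (pvShape_mark hm hp.1 hp.2) (fun q hq => hP q (List.mem_cons_of_mem _ hq)),
        pvGetE_mark hm hp.1 hp.2, List.any_cons]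
      by_cases h : (p.1 = (i : Int) ∧ p.2 = (j : Int)) ∨ (p.1 = (j : Int) ∧ p.2 = (i : Int))
      · rw [if_pos h]; simp [h]
      · rw [if_neg h]
        have : decide ((p.1 = (i : Int) ∧ p.2 = (j : Int)) ∨ (p.1 = (j : Int) ∧ p.2 = (i : Int))) = false :=
          decide_eq_false h
        simp only [this, Bool.false_or]

-- the pair list A traverses
def pvCondA (cycles : List (List Int)) (i j : Int) : Bool :=
  decide (PySem.Set.inter (PySem.Set.ofList (PySem.List.pyGetD cycles i []))
    (PySem.Set.ofList (PySem.List.pyGetD cycles j [])) ≠ [])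

def pvPA (cycles : List (List Int)) : List (Int × Int) :=
  (PySem.List.pyRange 0 (cycles.length : Int) 1).flatMap (fun i =>
    ((PySem.List.pyRange (i+1) (cycles.length : Int) 1).filter (fun j => pvCondA cycles i j)).map
      (fun j => (i, j)))

def pvZero (cycles : List (List Int)) : List (List Bool) :=
  (PySem.List.pyRange 0 (cycles.length : Int) 1).map (fun _ => PySem.List.pyRepeat [false] (cycles.length : Int))

theorem pv_build_cg_eq (cycles : List (List Int)) :
    build_cg cycles = pvFoldMark (pvZero cycles) (pvPA cycles) := by
  rw [pvFoldMark, pvPA, pv_foldl_flatMap]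
  simp only [build_cg, pvZero]
  apply PySem.List.foldl_congr_mem
  intro m i _
  rw [List.foldl_map, PySem.List.foldl_ite_eq_foldl_filter]
  rfl

-- the index dict of B
def pvIndex (cycles : List (List Int)) : PySem.Dict Int (List Int) :=
  (PySem.List.enumerate cycles 0).foldl (fun d ic =>
    (PySem.Set.ofList ic.2).foldl (fun d e => d.modify e [] (fun g => g ++ [ic.1])) d)
    PySem.Dict.empty

def pvG (cycles : List (List Int)) (e : Int) : List Int :=
  (PySem.List.pyRange 0 (cycles.length : Int) 1).filter
    (fun j => decide (e ∈ PySem.List.pyGetD cycles j ([] : List Int)))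

def pvPairsOf (g : List Int) : List (Int × Int) :=
  (PySem.List.pyRange 0 (g.length : Int) 1).flatMap (fun x =>
    (PySem.List.pyRange (x+1) (g.length : Int) 1).map (fun y =>
      (PySem.List.pyGetD g x 0, PySem.List.pyGetD g y 0)))

def pvPB (cycles : List (List Int)) : List (Int × Int) :=
  (pvIndex cycles).values.flatMap pvPairsOf

def pvPairsEL (cycles : List (List Int)) : List (Int × Int) :=
  (PySem.List.enumerate cycles 0).flatMap (fun ic => (PySem.Set.ofList ic.2).map (fun e => (e, ic.1)))

theorem pvIndex_eq_flat (cycles : List (List Int)) :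
    pvIndex cycles =
      (pvPairsEL cycles).foldl (fun d p => d.modify p.1 [] (fun g => g ++ [p.2])) PySem.Dict.empty := by
  rw [pvPairsEL, pv_foldl_flatMap, pvIndex]
  apply PySem.List.foldl_congr_mem
  intro d ic _
  rw [List.foldl_map]

theorem pv_build_cg_alt_eq (cycles : List (List Int)) :
    build_cg_alt cycles = pvFoldMark (pvZero cycles) (pvPB cycles) := by
  rw [pvFoldMark, pvPB, pv_foldl_flatMap]
  simp only [build_cg_alt, pvZero, pvIndex]
  apply PySem.List.foldl_congr_mem
  intro m g _
  rw [pvPairsOf, pv_foldl_flatMap]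
  apply PySem.List.foldl_congr_mem
  intro m' x _
  rw [List.foldl_map]

theorem pv_flatMap_if_singleton {α : Type} (l : List α) (p : α → Prop) [DecidablePred p] :
    l.flatMap (fun x => if p x then [x] else []) = l.filter (fun x => decide (p x)) := by
  induction l with
  | nil => rfl
  | cons a t ih =>
      by_cases h : p a <;> simp [List.flatMap_cons, h, ih]

theorem pv_chunk (c : List Int) (e j : Int) :
    (((PySem.Set.ofList c).map (fun e' => (e', j))).filter (fun p => p.1 == e)).map (fun p => p.2)
      = if e ∈ c then [j] else [] := by
  rw [List.filter_map]
  by_cases h : e ∈ c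
  · have h1 : (PySem.Set.ofList c).count e = 1 :=
      List.count_eq_one_of_mem (PySem.Set.nodup_ofList c) ((PySem.Set.mem_ofList c e).2 h)
    simp only [Function.comp_def]
    rw [List.filter_beq, h1]
    simp [h]
  · have h1 : (PySem.Set.ofList c).count e = 0 := by
      rw [List.count_eq_zero]
      simpa [PySem.Set.mem_ofList] using h
    simp only [Function.comp_def]
    rw [List.filter_beq, h1]
    simp [h]

theorem pvIndex_getD (cycles : List (List Int)) (e : Int) :
    (pvIndex cycles).getD e [] = pvG cycles e := by
  rw [pvIndex_eq_flat, PySem.Dict.getD_foldl_modify_append]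
  rw [pvPairsEL, PySem.List.enumerate_eq_map_pyRange _ ([] : List Int)]
  rw [List.flatMap_map, List.filter_flatMap, List.map_flatMap]
  simp only [pv_chunk]
  rw [pvG, pv_flatMap_if_singleton]
  simp [PySem.List.len]

theorem pvIndex_keys_nodup (cycles : List (List Int)) : (pvIndex cycles).keys.Nodup := by
  rw [pvIndex_eq_flat]
  exact PySem.Dict.nodup_keys_foldl_modify_key _ _ _ _ _ (by simp)

theorem pvIndex_mem_keys (cycles : List (List Int)) (e : Int) :
    e ∈ (pvIndex cycles).keys ↔ ∃ c ∈ cycles, e ∈ c := by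
  rw [pvIndex_eq_flat, PySem.Dict.keys_foldl_modify_key]
  rw [show (PySem.Dict.empty : PySem.Dict Int (List Int)).keys = [] from rfl,
    PySem.Set.update_nil_left, PySem.Set.mem_ofList]
  rw [pvPairsEL, PySem.List.enumerate_eq_map_pyRange _ ([] : List Int), List.flatMap_map]
  simp only [List.map_flatMap, List.map_map, Function.comp_def, List.map_id']
  simp only [List.mem_flatMap, PySem.Set.mem_ofList, PySem.List.mem_pyRange_one, PySem.List.len]
  constructor
  · rintro ⟨j, ⟨h0, hlen⟩, he⟩
    obtain ⟨jN, rfl⟩ := Int.eq_ofNat_of_zero_le h0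
    have hj : jN < cycles.length := by exact_mod_cast hlen
    refine ⟨cycles[jN], List.getElem_mem hj, ?_⟩
    rwa [PySem.List.pyGetD_natCast, List.getD_eq_getElem _ _ hj] at he
  · rintro ⟨c, hc, he⟩
    obtain ⟨jN, hj, rfl⟩ := List.getElem_of_mem hc
    exact ⟨(jN : Int), ⟨Int.natCast_nonneg jN, by exact_mod_cast hj⟩,
      by rwa [PySem.List.pyGetD_natCast, List.getD_eq_getElem _ _ hj]⟩

-- the shared characterisation: entry (i, j) is set iff i ≠ j and cycles i, j share an element
def pvR (cycles : List (List Int)) (i j : Nat) : Prop :=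
  i ≠ j ∧ ∃ e, e ∈ cycles.getD i [] ∧ e ∈ cycles.getD j []

theorem pv_mem_G (cycles : List (List Int)) (e a : Int) :
    a ∈ pvG cycles e ↔ (0 ≤ a ∧ a < (cycles.length : Int)) ∧ e ∈ PySem.List.pyGetD cycles a [] := by
  simp [pvG, List.mem_filter, PySem.List.mem_pyRange_one]

theorem pvG_pairwise (cycles : List (List Int)) (e : Int) :
    (pvG cycles e).Pairwise (· < ·) :=
  List.Pairwise.sublist List.filter_sublist (PySem.List.pairwise_lt_pyRange_one 0 _)

theorem pv_mem_values (cycles : List (List Int)) (g : List Int) :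
    g ∈ (pvIndex cycles).values ↔ ∃ e ∈ (pvIndex cycles).keys, g = pvG cycles e := by
  rw [PySem.Dict.values_eq_map_keys _ (pvIndex_keys_nodup cycles) ([] : List Int)]
  simp [List.mem_map, pvIndex_getD, eq_comm]

theorem pv_mem_pairsOf (g : List Int) (p : Int × Int) :
    p ∈ pvPairsOf g ↔ ∃ x y : Nat, x < y ∧ y < g.length ∧ p = (g.getD x 0, g.getD y 0) := by
  unfold pvPairsOf
  simp only [List.mem_flatMap, List.mem_map, PySem.List.mem_pyRange_one]
  constructor
  · rintro ⟨x, ⟨hx0, hxl⟩, y, ⟨hy1, hyl⟩, rfl⟩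
    obtain ⟨xN, rfl⟩ := Int.eq_ofNat_of_zero_le hx0
    obtain ⟨yN, rfl⟩ := Int.eq_ofNat_of_zero_le (by omega : (0 : Int) ≤ y)
    refine ⟨xN, yN, by exact_mod_cast (by omega : (xN : Int) < (yN : Int)), by exact_mod_cast hyl, ?_⟩
    rw [PySem.List.pyGetD_natCast, PySem.List.pyGetD_natCast]
  · rintro ⟨xN, yN, hxy, hyl, rfl⟩
    refine ⟨(xN : Int), ⟨Int.natCast_nonneg xN, by exact_mod_cast (by omega : xN < g.length)⟩,
      (yN : Int), ⟨by omega, by exact_mod_cast hyl⟩, ?_⟩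
    rw [PySem.List.pyGetD_natCast, PySem.List.pyGetD_natCast]

theorem pv_pairsOf_elems {g : List Int} (hpw : g.Pairwise (· < ·)) {p : Int × Int}
    (hp : p ∈ pvPairsOf g) : p.1 ∈ g ∧ p.2 ∈ g ∧ p.1 < p.2 := by
  obtain ⟨x, y, hxy, hyl, rfl⟩ := (pv_mem_pairsOf g p).1 hp
  have hxl : x < g.length := by omega
  rw [List.getD_eq_getElem _ _ hxl, List.getD_eq_getElem _ _ hyl]
  exact ⟨List.getElem_mem hxl, List.getElem_mem hyl,
    List.pairwise_iff_getElem.1 hpw x y hxl hyl hxy⟩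

theorem pv_pairsOf_mem_of {g : List Int} (hpw : g.Pairwise (· < ·)) {a b : Int}
    (hag : a ∈ g) (hbg : b ∈ g) (hab : a < b) : (a, b) ∈ pvPairsOf g := by
  obtain ⟨x, hx, hxe⟩ := List.getElem_of_mem hag
  obtain ⟨y, hy, hye⟩ := List.getElem_of_mem hbg
  have hxy : x < y := by
    rcases lt_trichotomy x y with h | h | h
    · exact h
    · exfalso; subst h; rw [hxe] at hye; omega
    · exfalso
      have := List.pairwise_iff_getElem.1 hpw y x hy hx h
      rw [hxe, hye] at this; omega
  rw [pv_mem_pairsOf]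
  exact ⟨x, y, hxy, hy, by rw [List.getD_eq_getElem _ _ hx, List.getD_eq_getElem _ _ hy, hxe, hye]⟩

theorem pv_mem_PA (cycles : List (List Int)) (p : Int × Int) :
    p ∈ pvPA cycles ↔
      (0 ≤ p.1 ∧ p.1 < p.2 ∧ p.2 < (cycles.length : Int)) ∧ pvCondA cycles p.1 p.2 = true := by
  unfold pvPA
  simp only [List.mem_flatMap, List.mem_filter, List.mem_map, PySem.List.mem_pyRange_one]
  constructor
  · rintro ⟨i, ⟨hi0, hil⟩, j, ⟨⟨hj1, hjl⟩, hc⟩, rfl⟩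
    exact ⟨⟨hi0, by omega, hjl⟩, hc⟩
  · rintro ⟨⟨h1, h2, h3⟩, hc⟩
    exact ⟨p.1, ⟨h1, by omega⟩, p.2, ⟨⟨by omega, h3⟩, hc⟩, rfl⟩

theorem pv_condA_iff (cycles : List (List Int)) (i j : Int) :
    pvCondA cycles i j = true ↔
      ∃ e, e ∈ PySem.List.pyGetD cycles i [] ∧ e ∈ PySem.List.pyGetD cycles j [] := by
  unfold pvCondA
  rw [decide_eq_true_iff]
  constructor
  · intro h
    obtain ⟨e, he⟩ := List.exists_mem_of_ne_nil _ h
    rw [PySem.Set.mem_inter] at he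
    exact ⟨e, (PySem.Set.mem_ofList _ _).1 he.1, (PySem.Set.mem_ofList _ _).1 he.2⟩
  · rintro ⟨e, h1, h2⟩
    exact List.ne_nil_of_mem ((PySem.Set.mem_inter _ _ e).2
      ⟨(PySem.Set.mem_ofList _ _).2 h1, (PySem.Set.mem_ofList _ _).2 h2⟩)

theorem pvPA_inRange (cycles : List (List Int)) : pvInRange cycles.length (pvPA cycles) := by
  intro p hp
  obtain ⟨⟨h1, h2, h3⟩, -⟩ := (pv_mem_PA cycles p).1 hp
  exact ⟨⟨h1, by omega⟩, ⟨by omega, h3⟩⟩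

theorem pvPB_inRange (cycles : List (List Int)) : pvInRange cycles.length (pvPB cycles) := by
  intro p hp
  obtain ⟨g, hg, hpg⟩ := List.mem_flatMap.1 hp
  obtain ⟨e, -, rfl⟩ := (pv_mem_values cycles g).1 hg
  obtain ⟨ha, hb, -⟩ := pv_pairsOf_elems (pvG_pairwise cycles e) hpg
  obtain ⟨⟨ha1, ha2⟩, -⟩ := (pv_mem_G cycles e p.1).1 ha
  obtain ⟨⟨hb1, hb2⟩, -⟩ := (pv_mem_G cycles e p.2).1 hb
  exact ⟨⟨ha1, ha2⟩, ⟨hb1, hb2⟩⟩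

theorem pvPA_any_iff (cycles : List (List Int)) (i j : Nat)
    (hi : i < cycles.length) (hj : j < cycles.length) :
    ((pvPA cycles).any (fun p => decide ((p.1 = (i : Int) ∧ p.2 = (j : Int)) ∨ (p.1 = (j : Int) ∧ p.2 = (i : Int)))) = true)
      ↔ pvR cycles i j := by
  rw [List.any_eq_true]
  constructor
  · rintro ⟨p, hp, hpred⟩
    obtain ⟨⟨h1, h2, h3⟩, hc⟩ := (pv_mem_PA cycles p).1 hp
    obtain ⟨e, he1, he2⟩ := (pv_condA_iff cycles p.1 p.2).1 hc
    rw [decide_eq_true_iff] at hpred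
    rcases hpred with ⟨q1, q2⟩ | ⟨q1, q2⟩
    · rw [q1] at he1; rw [q2] at he2; rw [q1, q2] at h2
      rw [PySem.List.pyGetD_natCast] at he1 he2
      exact ⟨by omega, e, he1, he2⟩
    · rw [q1] at he1; rw [q2] at he2; rw [q1, q2] at h2
      rw [PySem.List.pyGetD_natCast] at he1 he2
      exact ⟨by omega, e, he2, he1⟩
  · rintro ⟨hne, e, hei, hej⟩
    by_cases hij : i < j
    · have hmem : ((i : Int), (j : Int)) ∈ pvPA cycles := by
        rw [pv_mem_PA]
        refine ⟨⟨Int.natCast_nonneg i, ?_, ?_⟩, ?_⟩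
        · show ((i : Int)) < ((j : Int)); exact_mod_cast hij
        · show ((j : Int)) < ((cycles.length : Int)); exact_mod_cast hj
        · show pvCondA cycles ((i : Int)) ((j : Int)) = true
          rw [pv_condA_iff]
          exact ⟨e, by rwa [PySem.List.pyGetD_natCast], by rwa [PySem.List.pyGetD_natCast]⟩
      exact ⟨_, hmem, by simp⟩
    · have hji : j < i := by omega
      have hmem : ((j : Int), (i : Int)) ∈ pvPA cycles := by
        rw [pv_mem_PA]
        refine ⟨⟨Int.natCast_nonneg j, ?_, ?_⟩, ?_⟩
        · show ((j : Int)) < ((i : Int)); exact_mod_cast hji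
        · show ((i : Int)) < ((cycles.length : Int)); exact_mod_cast hi
        · show pvCondA cycles ((j : Int)) ((i : Int)) = true
          rw [pv_condA_iff]
          exact ⟨e, by rwa [PySem.List.pyGetD_natCast], by rwa [PySem.List.pyGetD_natCast]⟩
      exact ⟨_, hmem, by simp⟩

theorem pvPB_any_iff (cycles : List (List Int)) (i j : Nat)
    (hi : i < cycles.length) (hj : j < cycles.length) :
    ((pvPB cycles).any (fun p => decide ((p.1 = (i : Int) ∧ p.2 = (j : Int)) ∨ (p.1 = (j : Int) ∧ p.2 = (i : Int)))) = true)
      ↔ pvR cycles i j := by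
  rw [List.any_eq_true]
  constructor
  · rintro ⟨p, hp, hpred⟩
    obtain ⟨g, hg, hpg⟩ := List.mem_flatMap.1 hp
    obtain ⟨e, -, rfl⟩ := (pv_mem_values cycles g).1 hg
    obtain ⟨ha, hb, hab⟩ := pv_pairsOf_elems (pvG_pairwise cycles e) hpg
    obtain ⟨-, he1⟩ := (pv_mem_G cycles e p.1).1 ha
    obtain ⟨-, he2⟩ := (pv_mem_G cycles e p.2).1 hb
    rw [decide_eq_true_iff] at hpred
    rcases hpred with ⟨q1, q2⟩ | ⟨q1, q2⟩
    · rw [q1] at he1 hab; rw [q2] at he2 hab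
      rw [PySem.List.pyGetD_natCast] at he1 he2
      exact ⟨by omega, e, he1, he2⟩
    · rw [q1] at he1 hab; rw [q2] at he2 hab
      rw [PySem.List.pyGetD_natCast] at he1 he2
      exact ⟨by omega, e, he2, he1⟩
  · rintro ⟨hne, e, hei, hej⟩
    have heK : e ∈ (pvIndex cycles).keys := by
      rw [pvIndex_mem_keys]
      refine ⟨cycles[i], List.getElem_mem hi, ?_⟩
      rwa [List.getD_eq_getElem _ _ hi] at hei
    have hgi : ((i : Int)) ∈ pvG cycles e := (pv_mem_G cycles e _).2
      ⟨⟨Int.natCast_nonneg i, by exact_mod_cast hi⟩, by rwa [PySem.List.pyGetD_natCast]⟩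
    have hgj : ((j : Int)) ∈ pvG cycles e := (pv_mem_G cycles e _).2
      ⟨⟨Int.natCast_nonneg j, by exact_mod_cast hj⟩, by rwa [PySem.List.pyGetD_natCast]⟩
    have hmemv : pvG cycles e ∈ (pvIndex cycles).values :=
      (pv_mem_values cycles _).2 ⟨e, heK, rfl⟩
    by_cases hij : i < j
    · refine ⟨((i : Int), (j : Int)), List.mem_flatMap.2 ⟨pvG cycles e, hmemv,
        pv_pairsOf_mem_of (pvG_pairwise cycles e) hgi hgj (by exact_mod_cast hij)⟩, by simp⟩
    · have hji : j < i := by omega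
      refine ⟨((j : Int), (i : Int)), List.mem_flatMap.2 ⟨pvG cycles e, hmemv,
        pv_pairsOf_mem_of (pvG_pairwise cycles e) hgj hgi (by exact_mod_cast hji)⟩, by simp⟩

theorem pvZero_shape (cycles : List (List Int)) : pvShape (pvZero cycles) cycles.length := by
  constructor
  · simp [pvZero, PySem.List.length_pyRange_one]
  · intro r hrr
    obtain ⟨x, -, hx⟩ := List.mem_map.1 hrr
    rw [← hx, PySem.List.pyRepeat_singleton]
    simp

theorem pvZero_getE (cycles : List (List Int)) (i j : Nat) : pvGetE (pvZero cycles) i j = false := by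
  unfold pvGetE
  by_cases hi' : i < (pvZero cycles).length
  · rw [List.getD_eq_getElem _ _ hi']
    have hmem := List.getElem_mem hi'
    obtain ⟨x, -, hx⟩ := List.mem_map.1 hmem
    rw [← hx, PySem.List.pyRepeat_singleton]
    simp [List.getD_eq_getElem?_getD, List.getElem?_replicate]
    split_ifs <;> simp
  · rw [List.getD_eq_default (pvZero cycles) ([] : List Bool) (by omega)]
    simp

-- ===== VERDICT (by name: the statement is the Claim_ definition above) =====
theorem build_cg_spec : Claim_equal_build_cg := by
  intro cycles _
  unfold Spec_build_cg
  rw [pv_build_cg_eq, pv_build_cg_alt_eq]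
  have hA := pvShape_foldMark (pvZero_shape cycles) (pvPA_inRange cycles)
  have hB := pvShape_foldMark (pvZero_shape cycles) (pvPB_inRange cycles)
  apply List.ext_getElem (by rw [hA.1, hB.1])
  intro i hi hi'
  have hin : i < cycles.length := by rw [← hA.1]; exact hi
  apply List.ext_getElem
    (by rw [hA.2 _ (List.getElem_mem hi), hB.2 _ (List.getElem_mem hi')])
  intro j hj hj'
  have hjn : j < cycles.length := by
    rw [← hA.2 _ (List.getElem_mem hi)]; exact hj
  have eA : (pvFoldMark (pvZero cycles) (pvPA cycles))[i][j] =
      pvGetE (pvFoldMark (pvZero cycles) (pvPA cycles)) i j := by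
    simp [pvGetE, List.getD_eq_getElem?_getD, hi, hj]
  have eB : (pvFoldMark (pvZero cycles) (pvPB cycles))[i][j] =
      pvGetE (pvFoldMark (pvZero cycles) (pvPB cycles)) i j := by
    simp [pvGetE, List.getD_eq_getElem?_getD, hi', hj']
  rw [eA, eB,
    pvGetE_foldMark (pvZero_shape cycles) (pvPA_inRange cycles),
    pvGetE_foldMark (pvZero_shape cycles) (pvPB_inRange cycles),
    pvZero_getE]
  simp only [Bool.false_or]
  rw [Bool.eq_iff_iff, pvPA_any_iff cycles i j hin hjn, pvPB_any_iff cycles i j hin hjn]
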